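-- pv_equiv track=rewrite | github.com/Nic30/pyDigitalWaveTools | pyDigitalWaveTools/vcd/value_format.py | bitVectorToStr
-- ===== SOURCE A (Python) =====
-- from typing import Optional
--
-- def bitVectorToStr(val: int, width: int, vld_mask: int, prefix: Optional[str], suffix: Optional[str]):
--     buff = []
--     if prefix is not None:
--         buff.append(prefix)
--
--     for i in range(width - 1, -1, -1):
--         mask = (1 << i)
--         b = val & mask
--
--         if vld_mask & mask:
--             s = "1" if b else "0"
--         else:
--             s = "X"
--         buff.append(s)
--
--     if suffix is not None:
--         buff.append(suffix)
--
--     return ''.join(buff)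
-- ===== SOURCE B (Python) =====
-- from typing import Optional
--
--
-- def bitVectorToStr(val: int, width: int, vld_mask: int, prefix: Optional[str], suffix: Optional[str]):
--     if width > 0:
--         p = 1 << width
--         vstr = format(val % p, "0{}b".format(width))
--         kstr = format(vld_mask % p, "0{}b".format(width))
--         core = ''.join(v if k == '1' else 'X' for v, k in zip(vstr, kstr))
--     else:
--         core = ''
--     if prefix is not None:
--         core = prefix + core
--     if suffix is not None:
--         core = core + suffix
--     return core
-- ===== Notes on version B (the rewrite author's own statement) =====
-- stated objective: simpler
-- what changed: B replaces A's per-bit shift/mask Python loop by rendering the masked value and the masked validity mask as two width-wide binary strings with one format call each and overlaying invalid positions with 'X' via zip.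
import Mathlib
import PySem

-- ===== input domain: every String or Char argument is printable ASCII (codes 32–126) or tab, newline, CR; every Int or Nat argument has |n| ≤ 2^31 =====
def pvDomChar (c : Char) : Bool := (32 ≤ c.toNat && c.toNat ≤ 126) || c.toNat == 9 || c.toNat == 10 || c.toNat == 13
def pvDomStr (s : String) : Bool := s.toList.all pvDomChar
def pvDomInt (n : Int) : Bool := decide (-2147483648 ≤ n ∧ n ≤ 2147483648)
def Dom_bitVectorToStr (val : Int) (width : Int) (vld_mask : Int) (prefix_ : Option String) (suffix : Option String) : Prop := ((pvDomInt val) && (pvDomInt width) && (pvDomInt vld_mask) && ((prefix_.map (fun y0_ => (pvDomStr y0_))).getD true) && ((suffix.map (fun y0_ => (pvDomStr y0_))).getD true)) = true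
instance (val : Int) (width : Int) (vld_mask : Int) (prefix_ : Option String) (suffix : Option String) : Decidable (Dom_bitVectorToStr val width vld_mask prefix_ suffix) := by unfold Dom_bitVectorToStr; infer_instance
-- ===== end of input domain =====

-- B renders the masked value and the masked validity mask as two width-wide binary digit
-- strings at once and overlays invalid positions with 'X', instead of A's per-bit
-- shift-and-mask loop (objective: simpler decomposition, same result).

-- ===== PORT A =====
def bitVectorToStr (val : Int) (width : Int) (vld_mask : Int) (prefix_ : Option String) (suffix : Option String) : String :=
  let buff : List String := match prefix_ with | some p => [p] | none => []
  let buff := (PySem.List.pyRange (width - 1) (-1) (-1)).foldl (fun buff i =>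
    let mask : Int := (1 : Int) <<< i.toNat
    let b : Int := PySem.Int.band val mask
    let s : String := if PySem.Int.band vld_mask mask ≠ 0 then (if b ≠ 0 then "1" else "0") else "X"
    buff ++ [s]) buff
  let buff := match suffix with | some s => buff ++ [s] | none => buff
  PySem.Str.join "" buff

-- ===== PORT B =====
-- port of format(n, "0{w}b") for 0 ≤ n < 2^w: the w binary digits of n, MSB first
def pvBinDigits (n : Nat) (w : Nat) : List Char :=
  (List.range w).map (fun k => if n.testBit (w - 1 - k) then '1' else '0')

def bitVectorToStr_alt (val : Int) (width : Int) (vld_mask : Int) (prefix_ : Option String) (suffix : Option String) : String :=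
  let core : List Char :=
    if 0 < width then
      let p : Int := (1 : Int) <<< width
      let vstr := pvBinDigits (PySem.Int.mod val p).toNat width.toNat
      let kstr := pvBinDigits (PySem.Int.mod vld_mask p).toNat width.toNat
      (vstr.zip kstr).map (fun vk => if vk.2 = '1' then vk.1 else 'X')
    else []
  let core := match prefix_ with | some p => p.toList ++ core | none => core
  let core := match suffix with | some s => core ++ s.toList | none => core
  String.ofList core

-- ===== PRECONDITION & SPEC =====
def Spec_bitVectorToStr (val : Int) (width : Int) (vld_mask : Int) (prefix_ : Option String) (suffix : Option String) (out : String) : Prop := out = bitVectorToStr_alt val width vld_mask prefix_ suffix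
instance (val : Int) (width : Int) (vld_mask : Int) (prefix_ : Option String) (suffix : Option String) (out : String) : Decidable (Spec_bitVectorToStr val width vld_mask prefix_ suffix out) := by unfold Spec_bitVectorToStr; infer_instance

-- ===== CLAIM (what is proved, stated in full; the proofs are below) =====
def Claim_equal_bitVectorToStr : Prop := ∀ (val : Int) (width : Int) (vld_mask : Int) (prefix_ : Option String) (suffix : Option String), Dom_bitVectorToStr val width vld_mask prefix_ suffix → Spec_bitVectorToStr val width vld_mask prefix_ suffix (bitVectorToStr val width vld_mask prefix_ suffix)

-- ===== LEMMAS AND PROOFS =====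

-- Python `x & (1 << j)` is nonzero exactly when bit j of x (two's complement) is set.
theorem pv_band_two_pow (x : Int) (j : Nat) :
    (PySem.Int.band x ((1 : Int) <<< ((j : Nat) : Int)) ≠ 0) ↔ x.testBit j := by
  rw [Int.shiftLeft_natCast_right]
  have h2 : ((1 : Int) <<< j) = ((2 ^ j : Nat) : Int) := by
    rw [Int.shiftLeft_eq]; push_cast; ring
  rcases x with m | m
  · rw [h2, show (Int.ofNat m) = ((m : Nat) : Int) from rfl, PySem.Int.band_natCast,
      Nat.and_two_pow]
    simp only [Int.testBit]
    cases hb : m.testBit j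
    · simp
    · simp
  · rw [h2, PySem.Int.band.eq_1]
    have hneg : ¬ ((0:Int) ≤ Int.negSucc m) := Int.not_le.mpr (Int.negSucc_lt_zero m)
    have hpos : (0 : Int) ≤ ((2 ^ j : Nat) : Int) := by positivity
    simp only [hneg, if_false, hpos, if_true]
    have hm : (-(Int.negSucc m) - 1).toNat = m := by
      rw [Int.negSucc_eq]; omega
    have htn : (((2 ^ j : Nat) : Int)).toNat = 2 ^ j := by omega
    rw [hm, htn, Nat.and_comm, Nat.and_two_pow]
    simp only [Int.testBit]
    cases hb : m.testBit j
    · simp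
    · simp

-- Python `x % (1 << w)` viewed as a Nat has the same low bits as x (two's complement).
theorem pv_mod_two_pow_testBit (x : Int) (w j : Nat) (hj : j < w) :
    ((PySem.Int.mod x ((1 : Int) <<< ((w : Nat) : Int))).toNat).testBit j = x.testBit j := by
  rw [Int.shiftLeft_natCast_right]
  have h2 : ((1 : Int) <<< w) = ((2 ^ w : Nat) : Int) := by
    rw [Int.shiftLeft_eq]; push_cast; ring
  have hpos : (0 : Int) < ((2 ^ w : Nat) : Int) := by exact_mod_cast Nat.two_pow_pos w
  rw [h2, PySem.Int.mod_eq_emod_of_pos hpos]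
  rcases x with m | m
  · rw [show (Int.ofNat m) = ((m : Nat) : Int) from rfl, ← Int.natCast_mod]
    simp only [Int.toNat_natCast, Nat.testBit_mod_two_pow, hj, decide_true, Bool.true_and]
    rfl
  · set m' := m % 2 ^ w with hm'
    set q := m / 2 ^ w with hq
    have hm'lt : m' < 2 ^ w := Nat.mod_lt _ (Nat.two_pow_pos w)
    have hdm : 2 ^ w * q + m' = m := Nat.div_add_mod m (2 ^ w)
    have hPm : ((2 ^ w - 1 - m' : Nat) : Int) = ((2 ^ w : Nat) : Int) - 1 - (m' : Int) := by omega
    have hdvd : ((2 ^ w : Nat) : Int) ∣ (Int.negSucc m - ((2 ^ w - 1 - m' : Nat) : Int)) := by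
      refine ⟨-((q : Int) + 1), ?_⟩
      have h : ((2 ^ w : Nat) : Int) * (q : Int) + (m' : Int) = (m : Int) := by exact_mod_cast hdm
      rw [hPm, Int.negSucc_eq]
      linear_combination h
    have hmod : (Int.negSucc m) % ((2 ^ w : Nat) : Int) = ((2 ^ w - 1 - m' : Nat) : Int) % ((2 ^ w : Nat) : Int) :=
      Int.emod_eq_emod_iff_emod_sub_eq_zero.mpr (Int.emod_eq_zero_of_dvd hdvd)
    rw [hmod, Int.emod_eq_of_lt (by positivity) (by exact_mod_cast Nat.sub_lt_of_lt (by omega))]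
    have h3 : (((2 ^ w - 1 - m' : Nat) : Int)).toNat = 2 ^ w - (m' + 1) := by omega
    rw [h3, Nat.testBit_two_pow_sub_succ hm'lt]
    simp only [hj, decide_true, Bool.true_and, Int.testBit]
    rw [hm', Nat.testBit_mod_two_pow]
    simp [hj]

-- joining with the empty separator is flattening
theorem pv_join_empty (l : List (List Char)) : PySem.Chars.join [] l = l.flatten := by
  induction l with
  | nil => simp [PySem.Chars.join_nil]
  | cons a t ih =>
    cases t with
    | nil => simp [PySem.Chars.join_singleton]
    | cons b t' => rw [PySem.Chars.join_cons_cons]; simp only [List.flatten_cons] at ih ⊢; simp [ih]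

-- flattening singletons is mapping
theorem pv_flatten_singleton {α β : Type} (f : α → β) (l : List α) :
    (List.map (fun x => [f x]) l).flatten = List.map f l := by
  induction l with
  | nil => simp
  | cons a t ih => simp [ih]

-- the two middle parts agree: A's per-bit loop output versus B's overlay of binary renderings
theorem pv_core_eq (val width vld_mask : Int) :
    ((PySem.List.pyRange (width - 1) (-1) (-1)).map (String.toList ∘ fun i =>
      if PySem.Int.band vld_mask ((1 : Int) <<< ((i.toNat : Nat) : Int)) ≠ 0 then
        (if PySem.Int.band val ((1 : Int) <<< ((i.toNat : Nat) : Int)) ≠ 0 then "1" else "0") else "X")).flatten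
    = (if 0 < width then
        ((pvBinDigits (PySem.Int.mod val ((1 : Int) <<< width)).toNat width.toNat).zip
         (pvBinDigits (PySem.Int.mod vld_mask ((1 : Int) <<< width)).toNat width.toNat)).map
          (fun vk => if vk.2 = '1' then vk.1 else 'X')
       else []) := by
  by_cases hw : 0 < width
  · obtain ⟨w, rfl⟩ : ∃ w : Nat, width = ((w : Nat) : Int) :=
      ⟨width.toNat, (Int.toNat_of_nonneg hw.le).symm⟩
    rw [PySem.List.pyRange_neg_one]
    have hn : (((w : Nat) : Int) - 1 - (-1)).toNat = w := by omega
    rw [hn]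
    simp only [hw, if_true, Int.toNat_natCast]
    unfold pvBinDigits
    rw [List.zip_map', List.map_map, List.map_map]
    have hL : List.map ((String.toList ∘ fun i : Int =>
        if PySem.Int.band vld_mask ((1 : Int) <<< ((i.toNat : Nat) : Int)) ≠ 0 then
          (if PySem.Int.band val ((1 : Int) <<< ((i.toNat : Nat) : Int)) ≠ 0 then "1" else "0") else "X") ∘
          (fun k : Nat => ((w : Nat) : Int) - 1 - (k : Int))) (List.range w)
        = List.map (fun k => [((fun vk : Char × Char => if vk.2 = '1' then vk.1 else 'X') ∘ fun a =>
            (if (PySem.Int.mod val ((1 : Int) <<< ((w : Nat) : Int))).toNat.testBit (w - 1 - a) = true then '1' else '0',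
             if (PySem.Int.mod vld_mask ((1 : Int) <<< ((w : Nat) : Int))).toNat.testBit (w - 1 - a) = true then '1' else '0')) k])
          (List.range w) := by
      refine List.map_congr_left (fun k hk => ?_)
      have hk' : k < w := List.mem_range.mp hk
      have hi : ((((w : Nat) : Int) - 1 - (k : Int)).toNat) = w - 1 - k := by omega
      simp only [Function.comp, hi]
      set j := w - 1 - k with hjdef
      have hj : j < w := by omega
      rw [pv_mod_two_pow_testBit val w j hj, pv_mod_two_pow_testBit vld_mask w j hj]
      have hKb := pv_band_two_pow vld_mask j
      have hVb := pv_band_two_pow val j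
      by_cases hK : vld_mask.testBit j <;> by_cases hV : val.testBit j <;>
        simp [hK, hV] at hKb hVb <;> simp [hKb, hVb, hK, hV]
    rw [hL, pv_flatten_singleton]
  · have h0 : PySem.List.pyRange (width - 1) (-1) (-1) = [] := by
      rw [PySem.List.pyRange_neg_one]
      have h1 : (width - 1 - (-1)).toNat = 0 := by omega
      rw [h1]; rfl
    rw [h0]
    simp [hw]

-- ===== VERDICT (by name: the statement is the Claim_ definition above) =====
theorem bitVectorToStr_spec : Claim_equal_bitVectorToStr := by
  intro val width vld_mask prefix_ suffix _hdom
  unfold Spec_bitVectorToStr bitVectorToStr bitVectorToStr_alt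
  apply String.toList_inj.mp
  have hcore := pv_core_eq val width vld_mask
  rcases prefix_ with _ | p <;> rcases suffix with _ | s <;>
    simp only [PySem.List.foldl_append_singleton_eq_map, PySem.Str.toList_join,
      String.toList_ofList, List.map_append, List.map_map, pv_join_empty,
      List.flatten_append, List.flatten_nil, List.map_nil, List.map_cons,
      List.flatten_cons, List.nil_append, List.append_nil, String.toList_empty] <;>
    rw [hcore]
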